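-- pv_equiv track=rewrite | github.com/ErickMwazonga/sifu | general/combinations_all_possible_phrases.py | phrases
-- ===== SOURCE A (Python) =====
-- def phrases(arr, i=0):
--     '''Time and Space O(m^n*ns)'''
--     if i == len(arr):
--         return ['']
--     else:
--         fromNext = phrases(arr, i+1)
--         output = []
--
--         for word in arr[i]:
--             for phrase in fromNext:
--                 curr_str = (' ' if len(phrase) > 0 else '')
--                 output.append(word + curr_str + phrase)
--
--         return output
-- ===== SOURCE B (Python) =====
-- def phrases(arr, i=0):
--     acc = ['']
--     for j in reversed(range(i, len(arr))):
--         acc = [w + ' ' + p if p else w for w in arr[j] for p in acc]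
--     return acc
-- ===== Notes on version B (the rewrite author's own statement) =====
-- stated objective: simpler
-- what changed: Replaces A's suffix recursion with an iterative accumulation: a single loop over the indices in reverse extends each accumulated suffix phrase with every word of the current sublist.
import Mathlib
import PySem

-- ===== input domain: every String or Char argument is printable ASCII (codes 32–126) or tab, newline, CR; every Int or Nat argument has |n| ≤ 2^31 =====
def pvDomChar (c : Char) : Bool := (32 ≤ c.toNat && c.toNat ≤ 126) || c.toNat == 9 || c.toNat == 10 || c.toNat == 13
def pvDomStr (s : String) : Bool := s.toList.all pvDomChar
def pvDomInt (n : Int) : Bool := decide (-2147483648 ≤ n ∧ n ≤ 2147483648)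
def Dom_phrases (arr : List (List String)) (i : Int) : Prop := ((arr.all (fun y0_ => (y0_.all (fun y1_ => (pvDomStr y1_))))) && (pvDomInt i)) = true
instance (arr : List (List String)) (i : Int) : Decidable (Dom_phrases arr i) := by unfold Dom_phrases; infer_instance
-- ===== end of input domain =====

set_option maxHeartbeats 800000


-- B replaces A's suffix recursion by an iterative accumulation: one loop over the
-- indices in reverse extends each accumulated suffix phrase with every word of the
-- current sublist; a simpler decomposition, not claimed faster.

-- ===== PORT A =====
-- Python's recursion diverges for i > len(arr); fuel (len(arr) - i) + 1 covers every
-- input admitted by Pre_phrases, elsewhere the 0-fuel value is never claimed about.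
def phrasesAux (arr : List (List String)) : Nat → Int → List String
  | 0, _ => []
  | n+1, i =>
    if i = PySem.List.len arr then [""]
    else
      let fromNext := phrasesAux arr n (i+1)
      ((PySem.List.pyGet? arr i).getD []).foldl
        (fun output word =>
          fromNext.foldl
            (fun output phrase =>
              output ++ [word ++ (if PySem.Str.len phrase > 0 then " " else "") ++ phrase])
            output)
        []

def phrases (arr : List (List String)) (i : Int) : List String :=
  phrasesAux arr ((PySem.List.len arr - i).toNat + 1) i

-- ===== PORT B =====
-- 'for j in reversed(range(i, len(arr)))' is a foldl over (pyRange i len 1).reverse;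
-- the comprehension '[… for w in arr[j] for p in acc]' is flatMap over arr[j] of map over acc
def phrases_alt (arr : List (List String)) (i : Int) : List String :=
  ((PySem.List.pyRange i (PySem.List.len arr) 1).reverse).foldl
    (fun acc j =>
      ((PySem.List.pyGet? arr j).getD []).flatMap
        (fun w => acc.map (fun p => if p = "" then w else w ++ " " ++ p)))
    [""]

-- ===== PRECONDITION & SPEC =====
-- Pre_ excludes exactly the inputs where the Python A raises: i > len(arr)
-- (unbounded recursion, RecursionError) and i < -len(arr) (arr[i] IndexError).
def Pre_phrases (arr : List (List String)) (i : Int) : Prop :=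
  -(arr.length : Int) ≤ i ∧ i ≤ (arr.length : Int)
instance (arr : List (List String)) (i : Int) : Decidable (Pre_phrases arr i) := by
  unfold Pre_phrases; infer_instance

def pvWitness_phrases : List (List String) × Int := ([["a", ""], ["b c"]], 0)

def Spec_phrases (arr : List (List String)) (i : Int) (out : List String) : Prop := out = phrases_alt arr i
instance (arr : List (List String)) (i : Int) (out : List String) : Decidable (Spec_phrases arr i out) := by unfold Spec_phrases; infer_instance

-- ===== CLAIM (what is proved, stated in full; the proofs are below) =====
def Claim_equal_phrases : Prop := ∀ (arr : List (List String)) (i : Int), Dom_phrases arr i → Pre_phrases arr i → Spec_phrases arr i (phrases arr i)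

-- ===== LEMMAS AND PROOFS =====

-- A's recursion, denotationally: phrases over the sublists from position i on
def combineA : List (List String) → List String
  | [] => [""]
  | l :: ls => l.flatMap (fun w =>
      (combineA ls).map (fun p => w ++ (if PySem.Str.len p > 0 then " " else "") ++ p))

-- the sublists A (and B) traverse, honouring Python's negative indexing
def listsOf (arr : List (List String)) (i : Int) : List (List String) :=
  (PySem.List.pyRange i (PySem.List.len arr) 1).map
    (fun j => (PySem.List.pyGet? arr j).getD [])

lemma listsOf_cons (arr : List (List String)) (i : Int) (h : i < (arr.length : Int)) :
    listsOf arr i = ((PySem.List.pyGet? arr i).getD []) :: listsOf arr (i + 1) := by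
  rw [listsOf, listsOf, PySem.List.pyRange_one_cons (by simpa using h), List.map_cons]

lemma phrasesAux_eq (arr : List (List String)) :
    ∀ n (i : Int), -(arr.length : Int) ≤ i → i ≤ (arr.length : Int) →
      ((arr.length : Int) - i).toNat < n → phrasesAux arr n i = combineA (listsOf arr i) := by
  intro n
  induction n with
  | zero => intro i _ _ hf; omega
  | succ n ih =>
    intro i h1 h2 hf
    rw [phrasesAux]
    by_cases hi : i = PySem.List.len arr
    · rw [if_pos hi, listsOf, hi, PySem.List.pyRange_one_eq_nil le_rfl]
      simp [combineA]
    · rw [if_neg hi]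
      have hlt : i < (arr.length : Int) := by
        simp only [PySem.List.len_eq] at hi; omega
      rw [ih (i + 1) (by omega) (by omega) (by omega)]
      rw [listsOf_cons arr i hlt, combineA]
      simp only [PySem.List.foldl_append_singleton_eq_map,
        PySem.List.foldl_append_eq_flatMap, List.nil_append]

lemma strLen_toList (s : String) : PySem.Str.len s = (s.toList.length : Int) := by
  simp [pysem]

-- the two branch expressions agree pointwise
lemma branch_eq (w p : String) :
    (if p = "" then w else w ++ " " ++ p)
      = w ++ (if PySem.Str.len p > 0 then " " else "") ++ p := by
  by_cases hp : p = ""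
  · subst hp
    rw [if_pos rfl, strLen_toList]
    simp
  · rw [if_neg hp, if_pos, String.append_assoc]
    rw [strLen_toList]
    have hne : p.toList ≠ [] := fun h => hp (String.toList_inj.mp (by simp [h]))
    have := List.length_pos_iff.mpr hne
    omega

-- B's right-to-left loop computes combineA
lemma foldr_eq_combineA (ls : List (List String)) :
    ls.foldr
      (fun l acc => l.flatMap (fun w => acc.map (fun p => if p = "" then w else w ++ " " ++ p)))
      [""] = combineA ls := by
  induction ls with
  | nil => rfl
  | cons l ls ih =>
    rw [List.foldr_cons, ih, combineA]
    simp only [branch_eq]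

-- ===== VERDICT (by name: the statement is the Claim_ definition above) =====
theorem phrases_spec : Claim_equal_phrases := by
  intro arr i _ hpre
  obtain ⟨h1, h2⟩ := hpre
  show phrases arr i = phrases_alt arr i
  rw [phrases, phrasesAux_eq arr _ i h1 h2 (by simp only [PySem.List.len_eq]; omega)]
  rw [phrases_alt, List.foldl_reverse, ← foldr_eq_combineA, listsOf, List.foldr_map]
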